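-- pv_equiv track=rewrite | github.com/djpohly/csci232-examples-f24 | files.py | factor_dict1
-- ===== SOURCE A (Python) =====
-- def factor_dict1(n):
--     result = {}
--     for factorme in range(1, n + 1):
--         factorlist = []
--
--         for candidate in range(1, factorme + 1):
--             if factorme % candidate == 0:
--                 factorlist.append(candidate)
--
--         result[factorme] = factorlist
--     return result
-- ===== SOURCE B (Python) =====
-- def factor_dict1(n):
--     # Divisor sieve: append each d to all of its multiples, one pass per d.
--     result = {m: [] for m in range(1, n + 1)}
--     for d in range(1, n + 1):
--         for m in range(d, n + 1, d):
--             result[m].append(d)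
--     return result
-- ===== Notes on version B (the rewrite author's own statement) =====
-- stated objective: faster
-- what changed: Replaces the per-number trial division (testing every candidate 1..m for each m) by a divisor sieve that appends each d once to all of its multiples.
import Mathlib
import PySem

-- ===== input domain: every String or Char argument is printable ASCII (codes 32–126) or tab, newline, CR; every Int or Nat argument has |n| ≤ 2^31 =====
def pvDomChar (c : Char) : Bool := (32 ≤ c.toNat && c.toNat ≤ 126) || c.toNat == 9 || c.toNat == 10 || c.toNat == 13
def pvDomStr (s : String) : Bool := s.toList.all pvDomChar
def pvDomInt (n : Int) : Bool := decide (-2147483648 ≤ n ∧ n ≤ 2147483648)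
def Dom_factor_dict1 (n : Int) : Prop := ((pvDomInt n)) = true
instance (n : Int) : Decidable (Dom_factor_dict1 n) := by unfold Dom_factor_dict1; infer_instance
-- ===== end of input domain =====

-- B replaces A's per-number trial division by a divisor sieve (append d to all its multiples); asymptotically faster.

-- ===== PORT A =====
def factor_dict1 (n : Int) : List (Int × List Int) :=
  ((PySem.List.pyRange 1 (n + 1) 1).foldl
    (fun result factorme =>
      result.insert factorme
        ((PySem.List.pyRange 1 (factorme + 1) 1).foldl
          (fun factorlist candidate =>
            if PySem.Int.mod factorme candidate == 0 then factorlist ++ [candidate]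
            else factorlist)
          []))
    (PySem.Dict.empty : PySem.Dict Int (List Int))).items

-- ===== PORT B =====
def factor_dict1_alt (n : Int) : List (Int × List Int) :=
  ((PySem.List.pyRange 1 (n + 1) 1).foldl
    (fun result d =>
      (PySem.List.pyRange d (n + 1) d).foldl
        (fun result m => result.modify m [] (· ++ [d])) result)
    ((PySem.List.pyRange 1 (n + 1) 1).foldl
      (fun result m => result.insert m ([] : List Int)) PySem.Dict.empty)).items

-- ===== PRECONDITION & SPEC =====
def Spec_factor_dict1 (n : Int) (out : List (Int × List Int)) : Prop := out = factor_dict1_alt n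
instance (n : Int) (out : List (Int × List Int)) : Decidable (Spec_factor_dict1 n out) := by unfold Spec_factor_dict1; infer_instance

-- ===== CLAIM (what is proved, stated in full; the proofs are below) =====
def Claim_equal_factor_dict1 : Prop := ∀ (n : Int), Dom_factor_dict1 n → Spec_factor_dict1 n (factor_dict1 n)

-- ===== LEMMAS AND PROOFS =====

-- initialization loop: every value is []
theorem pv_init_getD (l : List Int) (d : PySem.Dict Int (List Int)) (k : Int)
    (h : ∀ k', d.getD k' ([] : List Int) = []) :
    (l.foldl (fun r m => r.insert m ([] : List Int)) d).getD k [] = [] := by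
  induction l generalizing d with
  | nil => exact h k
  | cons a l ih =>
      simp only [List.foldl_cons]
      exact ih _ (fun k' => by rw [PySem.Dict.getD_insert]; split <;> simp [h])

-- initialization loop: keys are exactly the inserted list
theorem pv_init_keys (l : List Int) (hnd : l.Nodup) :
    (l.foldl (fun r m => r.insert m ([] : List Int)) PySem.Dict.empty).keys = l := by
  rw [PySem.Dict.keys_foldl_insert l (fun _ _ => []) PySem.Dict.empty, PySem.Dict.keys_empty]
  simpa using PySem.Set.update_eq_append_of_disjoint [] l hnd (by simp)

-- inner sieve loop over a duplicate-free list of multiples: appends v exactly where the key occurs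
theorem pv_inner_getD (l : List Int) (hnd : l.Nodup) (dct : PySem.Dict Int (List Int))
    (v k : Int) :
    (l.foldl (fun r m => r.modify m [] (· ++ [v])) dct).getD k [] =
      dct.getD k [] ++ (if k ∈ l then [v] else []) := by
  induction l generalizing dct with
  | nil => simp
  | cons a l ih =>
      simp only [List.foldl_cons]
      rw [ih (List.nodup_cons.mp hnd).2]
      rw [PySem.Dict.getD_modify]
      by_cases hk : k = a
      · subst hk
        simp [(List.nodup_cons.mp hnd).1]
      · simp [hk, List.mem_cons]

-- inner sieve loop keeps the key set when every touched key is present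
theorem pv_inner_keys (l : List Int) (dct : PySem.Dict Int (List Int)) (v : Int)
    (h : ∀ m ∈ l, m ∈ dct.keys) :
    (l.foldl (fun r m => r.modify m [] (· ++ [v])) dct).keys = dct.keys := by
  induction l generalizing dct with
  | nil => rfl
  | cons a l ih =>
      simp only [List.foldl_cons]
      have hkeys : (dct.modify a ([] : List Int) (· ++ [v])).keys = dct.keys := by
        rw [PySem.Dict.keys_modify, PySem.Dict.keys_insert_of_contains]
        exact (PySem.Dict.contains_iff_mem_keys dct a).mpr (h a (List.mem_cons_self))
      rw [ih _ (fun m hm => by rw [hkeys]; exact h m (List.mem_cons_of_mem a hm))]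
      exact hkeys

-- a positive-step range has no duplicates
theorem pv_nodup_pyRange_pos (a b s : Int) (hs : 0 < s) :
    (PySem.List.pyRange a b s).Nodup := by
  rw [PySem.List.pyRange_of_pos a b hs]
  refine List.Nodup.map ?_ List.nodup_range
  intro x y hxy
  have h1 : s * (x : Int) = s * (y : Int) := add_left_cancel hxy
  exact_mod_cast mul_left_cancel₀ (by omega : s ≠ 0) h1

-- outer sieve loop: value at k collects exactly the d whose multiples hit k
theorem pv_outer_getD (n : Int) (ds : List Int) (dct : PySem.Dict Int (List Int)) (k : Int)
    (hpos : ∀ d ∈ ds, 0 < d) :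
    (ds.foldl
        (fun r d => (PySem.List.pyRange d (n + 1) d).foldl
          (fun r m => r.modify m [] (· ++ [d])) r) dct).getD k [] =
      dct.getD k [] ++ ds.filter (fun d => decide (k ∈ PySem.List.pyRange d (n + 1) d)) := by
  induction ds generalizing dct with
  | nil => simp
  | cons a ds ih =>
      simp only [List.foldl_cons]
      rw [ih _ (fun d hd => hpos d (List.mem_cons_of_mem a hd))]
      rw [pv_inner_getD _ (pv_nodup_pyRange_pos a (n + 1) a (hpos a List.mem_cons_self)) dct a k]
      rw [List.filter_cons]
      by_cases hk : k ∈ PySem.List.pyRange a (n + 1) a <;> simp [hk]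

-- outer sieve loop keeps the key set
theorem pv_outer_keys (n : Int) (ds : List Int) (dct : PySem.Dict Int (List Int))
    (hpos : ∀ d ∈ ds, 0 < d)
    (hmem : ∀ d ∈ ds, ∀ m ∈ PySem.List.pyRange d (n + 1) d, m ∈ dct.keys) :
    (ds.foldl
        (fun r d => (PySem.List.pyRange d (n + 1) d).foldl
          (fun r m => r.modify m [] (· ++ [d])) r) dct).keys = dct.keys := by
  induction ds generalizing dct with
  | nil => rfl
  | cons a ds ih =>
      simp only [List.foldl_cons]
      have h1 : ((PySem.List.pyRange a (n + 1) a).foldl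
          (fun r m => r.modify m [] (· ++ [a])) dct).keys = dct.keys :=
        pv_inner_keys _ dct a (hmem a List.mem_cons_self)
      rw [ih _ (fun d hd => hpos d (List.mem_cons_of_mem a hd))
        (fun d hd m hm => by rw [h1]; exact hmem d (List.mem_cons_of_mem a hd) m hm)]
      exact h1

-- for 1 ≤ k ≤ n, the d ≤ n whose multiple range hits k are exactly A's divisors 1 ≤ c ≤ k
theorem pv_filter_eq (n k : Int) (hk1 : 1 ≤ k) (hkn : k ≤ n) :
    (PySem.List.pyRange 1 (n + 1) 1).filter
        (fun d => decide (k ∈ PySem.List.pyRange d (n + 1) d)) =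
      (PySem.List.pyRange 1 (k + 1) 1).filter
        (fun c => PySem.Int.mod k c == 0) := by
  rw [PySem.List.pyRange_one_append 1 (k + 1) (n + 1) (by omega) (by omega), List.filter_append]
  have h2 : (PySem.List.pyRange (k + 1) (n + 1) 1).filter
      (fun d => decide (k ∈ PySem.List.pyRange d (n + 1) d)) = [] := by
    rw [List.filter_eq_nil_iff]
    intro d hd
    have hd' := (PySem.List.mem_pyRange_one).mp hd
    simp only [decide_eq_true_eq]
    intro hmem
    have := (PySem.List.mem_pyRange_iff_of_pos (by omega) k).mp hmem
    omega
  rw [h2, List.append_nil]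
  apply List.filter_congr
  intro c hc
  have hc' := (PySem.List.mem_pyRange_one).mp hc
  have hiff : c ∣ k - c ↔ c ∣ k := by
    constructor
    · intro h; simpa using h.add (dvd_refl c)
    · intro h; exact dvd_sub h (dvd_refl c)
  have hdvd : (k ∈ PySem.List.pyRange c (n + 1) c) ↔ c ∣ k := by
    rw [PySem.List.mem_pyRange_iff_of_pos (by omega) k]
    constructor
    · rintro ⟨_, _, h3⟩
      exact hiff.mp h3
    · intro h
      exact ⟨Int.le_of_dvd (by omega) h, by omega, hiff.mpr h⟩
  have hmod : (PySem.Int.mod k c == 0) = true ↔ c ∣ k := by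
    simp [PySem.Int.mod_eq_zero_iff_dvd]
  rw [Bool.eq_iff_iff, decide_eq_true_iff, hdvd, hmod]

-- A's loop builds, for each m in order, the filtered candidate list
theorem pv_A_items (n : Int) :
    factor_dict1 n = (PySem.List.pyRange 1 (n + 1) 1).map
      (fun m => (m, (PySem.List.pyRange 1 (m + 1) 1).filter
        (fun c => PySem.Int.mod m c == 0))) := by
  unfold factor_dict1
  rw [PySem.Dict.items_foldl_insert_fresh (PySem.List.pyRange 1 (n + 1) 1)
        (fun a => a)
        (fun factorme => (PySem.List.pyRange 1 (factorme + 1) 1).foldl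
          (fun factorlist candidate =>
            if PySem.Int.mod factorme candidate == 0 then factorlist ++ [candidate]
            else factorlist) [])
        PySem.Dict.empty
        (fun a _ => PySem.Dict.contains_empty a)
        (by simpa using PySem.List.nodup_pyRange_one 1 (n + 1))]
  have hemp : (PySem.Dict.empty : PySem.Dict Int (List Int)).items = [] := rfl
  rw [hemp, List.nil_append]
  apply List.map_congr_left
  intro a _
  refine congrArg (Prod.mk a) ?_
  simpa using PySem.List.foldl_append_if (fun c => PySem.Int.mod a c == 0) (fun c => c)
    (PySem.List.pyRange 1 (a + 1) 1) []

-- B's sieve produces, for each m in order, the d whose multiple range hits m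
theorem pv_B_items (n : Int) :
    factor_dict1_alt n = (PySem.List.pyRange 1 (n + 1) 1).map
      (fun m => (m, (PySem.List.pyRange 1 (n + 1) 1).filter
        (fun d => decide (m ∈ PySem.List.pyRange d (n + 1) d)))) := by
  unfold factor_dict1_alt
  have hkeys_init : ((PySem.List.pyRange 1 (n + 1) 1).foldl
      (fun r m => r.insert m ([] : List Int)) PySem.Dict.empty).keys
      = PySem.List.pyRange 1 (n + 1) 1 :=
    pv_init_keys _ (PySem.List.nodup_pyRange_one 1 (n + 1))
  have hpos : ∀ d ∈ PySem.List.pyRange 1 (n + 1) 1, 0 < d := by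
    intro d hd; have := (PySem.List.mem_pyRange_one).mp hd; omega
  have hkeys : ((PySem.List.pyRange 1 (n + 1) 1).foldl
      (fun result d =>
        (PySem.List.pyRange d (n + 1) d).foldl
          (fun result m => result.modify m [] (· ++ [d])) result)
      ((PySem.List.pyRange 1 (n + 1) 1).foldl
        (fun result m => result.insert m ([] : List Int)) PySem.Dict.empty)).keys
      = PySem.List.pyRange 1 (n + 1) 1 := by
    refine Eq.trans (pv_outer_keys n (PySem.List.pyRange 1 (n + 1) 1) _ hpos ?_) hkeys_init
    intro d hd m hm
    rw [hkeys_init, PySem.List.mem_pyRange_one]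
    have hd' := (PySem.List.mem_pyRange_one).mp hd
    have := (PySem.List.mem_pyRange_iff_of_pos (by omega) m).mp hm
    omega
  rw [PySem.Dict.items_eq_map_keys _
        (by rw [hkeys]; exact PySem.List.nodup_pyRange_one 1 (n + 1)) ([] : List Int), hkeys]
  apply List.map_congr_left
  intro m hm
  rw [pv_outer_getD n _ _ m hpos,
      pv_init_getD _ _ m (fun k' => PySem.Dict.getD_of_not_contains _ _ (PySem.Dict.contains_empty k')),
      List.nil_append]

-- ===== VERDICT (by name: the statement is the Claim_ definition above) =====
theorem factor_dict1_spec : Claim_equal_factor_dict1 := by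
  intro n _
  show factor_dict1 n = factor_dict1_alt n
  rw [pv_A_items, pv_B_items]
  apply List.map_congr_left
  intro m hm
  have hm' := (PySem.List.mem_pyRange_one).mp hm
  exact congrArg (Prod.mk m) (pv_filter_eq n m (by omega) (by omega)).symm
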